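-- pv_equiv track=rewrite | github.com/sgennari/cmpt_100_tutorials | dictionaries/solutions/solution0.py | build_placements
-- ===== SOURCE A (Python) =====
-- def build_placements(shoes):
--     """ (list of str) -> dict of {str: list of int}
--     Return a dictionary where each key is a company
--     and each value is a
--     list of placements by people wearing shoes
--     made by that company.
--
--     >>> result = build_placements(['Saucony', 'Asics', \
--             'Asics', 'NB', 'Saucony', 'Nike', 'Asics', 'Adidas', \
--             'Saucony', 'Asics'])
--
--     >>> result == {'Saucony': [1, 5, 9], \
--     'Asics': [2, 3, 7, 10], 'NB': [4], 'Nike': [6], \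
--     'Adidas': [8]}
--     True
--     """
--     placements = {}
--     position = 1
--     for brand in shoes:
--         if brand not in placements:
--             placements[brand] = []
--         placements[brand].append(position)
--         position = position + 1
--     return placements
-- ===== SOURCE B (Python) =====
-- def build_placements(shoes):
--     brands = list(dict.fromkeys(shoes))
--     return {brand: [i + 1 for i, b in enumerate(shoes) if b == brand]
--             for brand in brands}
-- ===== Notes on version B (the rewrite author's own statement) =====
-- stated objective: alternative
-- what changed: Replaced the single incremental dict-accumulation pass carrying a position counter by a distinct-brands pass (dict.fromkeys) followed by one enumerate-filter scan per brand.
import Mathlib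
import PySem

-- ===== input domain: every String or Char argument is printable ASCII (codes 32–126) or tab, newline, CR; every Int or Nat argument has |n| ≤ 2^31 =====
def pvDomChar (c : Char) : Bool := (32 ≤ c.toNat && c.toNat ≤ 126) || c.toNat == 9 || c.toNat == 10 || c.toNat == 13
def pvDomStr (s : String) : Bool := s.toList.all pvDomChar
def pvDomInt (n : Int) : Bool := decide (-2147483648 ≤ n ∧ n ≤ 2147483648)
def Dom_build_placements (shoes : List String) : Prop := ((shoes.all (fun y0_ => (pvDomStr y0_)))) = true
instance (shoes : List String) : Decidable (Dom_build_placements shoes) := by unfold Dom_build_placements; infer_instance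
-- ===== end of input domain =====

-- B groups by one filtering scan of enumerate(shoes) per distinct brand instead of A's
-- single accumulation pass with a position counter; alternative decomposition, not faster.

-- ===== PORT A =====
-- literal port of A's loop: state = (placements dict, position counter)
def build_placements (shoes : List String) : List (String × List Int) :=
  (shoes.foldl
    (fun (st : PySem.Dict String (List Int) × Int) brand =>
      let d := if st.1.contains brand then st.1 else st.1.insert brand []
      (d.insert brand (d.getD brand [] ++ [st.2]), st.2 + 1))
    (PySem.Dict.empty, 1)).1.items

-- ===== PORT B =====
-- list(dict.fromkeys(shoes)) = PySem.Set.ofList shoes (first-occurrence distinct)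
def build_placements_alt (shoes : List String) : List (String × List Int) :=
  (PySem.Set.ofList shoes).map (fun brand =>
    (brand, ((PySem.List.enumerate shoes).filter (fun p => p.2 == brand)).map (fun p => p.1 + 1)))

-- ===== PRECONDITION & SPEC =====
def Spec_build_placements (shoes : List String) (out : List (String × List Int)) : Prop := out = build_placements_alt shoes
instance (shoes : List String) (out : List (String × List Int)) : Decidable (Spec_build_placements shoes out) := by unfold Spec_build_placements; infer_instance

-- ===== CLAIM (what is proved, stated in full; the proofs are below) =====
def Claim_equal_build_placements : Prop := ∀ (shoes : List String), Dom_build_placements shoes → Spec_build_placements shoes (build_placements shoes)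

-- ===== LEMMAS AND PROOFS =====

-- 1-based positions of brand in l (B's per-brand value)
def posList (l : List String) (brand : String) : List Int :=
  ((PySem.List.enumerate l).filter (fun p => p.2 == brand)).map (fun p => p.1 + 1)

lemma posList_append (l : List String) (b brand : String) :
    posList (l ++ [b]) brand =
      posList l brand ++ (if b = brand then [(l.length : Int) + 1] else []) := by
  simp [posList, PySem.List.enumerate_append, PySem.List.enumerate_cons, PySem.List.enumerate_nil,
    List.filter_append]
  split_ifs with h <;> simp [h]

lemma posList_of_not_mem (l : List String) (brand : String) (h : brand ∉ l) :
    posList l brand = [] := by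
  simp only [posList, List.map_eq_nil_iff, List.filter_eq_nil_iff]
  intro p hp
  rcases (PySem.List.mem_enumerate_iff _ _ _).1 hp with ⟨k, hk, rfl⟩
  simp only [beq_iff_eq]
  intro he; exact h (he ▸ List.getElem_mem hk)

-- loop invariant: after processing l, the dict's items are B's groups over l and the counter is |l|+1
lemma loop_inv (l : List String) :
    l.foldl
      (fun (st : PySem.Dict String (List Int) × Int) brand =>
        let d := if st.1.contains brand then st.1 else st.1.insert brand []
        (d.insert brand (d.getD brand [] ++ [st.2]), st.2 + 1))
      (PySem.Dict.empty, 1)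
    = (PySem.Dict.mk ((PySem.Set.ofList l).map (fun b => (b, posList l b))),
       (l.length : Int) + 1) := by
  induction l using List.reverseRecOn with
  | nil => rfl
  | append_singleton l b ih =>
    rw [List.foldl_append, ih, List.foldl_cons, List.foldl_nil]
    have hkeys : (PySem.Dict.mk ((PySem.Set.ofList l).map (fun b => (b, posList l b)))).keys
        = PySem.Set.ofList l := by
      simp only [PySem.Dict.keys, List.map_map]
      rw [show ((fun x : String × List Int => x.1) ∘ fun b => (b, posList l b)) = id from rfl,
        List.map_id]
    have hcont : (PySem.Dict.mk ((PySem.Set.ofList l).map (fun b => (b, posList l b)))).contains b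
        = decide (b ∈ l) := by
      rw [PySem.Dict.contains_eq_decide_mem_keys, hkeys]
      simp [PySem.Set.mem_ofList]
    by_cases hb : b ∈ l
    · -- brand already present: overwrite its list with the appended one
      simp only [hcont, hb, decide_true, if_true]
      have hnd : (PySem.Dict.mk ((PySem.Set.ofList l).map (fun b => (b, posList l b)))).keys.Nodup := by
        rw [hkeys]; exact PySem.Set.nodup_ofList l
      have hmem : (b, posList l b) ∈ ((PySem.Set.ofList l).map (fun b => (b, posList l b))) :=
        List.mem_map_of_mem ((PySem.Set.mem_ofList l b).2 hb)
      have hgetD : (PySem.Dict.mk ((PySem.Set.ofList l).map (fun b => (b, posList l b)))).getD b []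
          = posList l b := PySem.Dict.getD_of_mem_items _ hmem hnd []
      have hcont' : (PySem.Dict.mk ((PySem.Set.ofList l).map (fun b => (b, posList l b)))).contains b
          = true := by rw [hcont]; simp [hb]
      refine Prod.ext ?_ (by simp only [List.length_append, List.length_cons, List.length_nil]; push_cast; ring)
      apply PySem.Dict.ext
      rw [hgetD, PySem.Dict.items_insert_of_contains _ _ hcont']
      have hS : PySem.Set.ofList (l ++ [b]) = PySem.Set.ofList l := by
        rw [PySem.Set.ofList_append_singleton,
          PySem.Set.add_of_mem ((PySem.Set.mem_ofList l b).2 hb)]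
      simp only [hS, List.map_map]
      refine List.map_congr_left (fun b' hb' => ?_)
      simp only [Function.comp]
      by_cases hbb : b' = b
      · subst hbb
        simp [posList_append]
      · simp only [beq_iff_eq, hbb, if_false]
        rw [posList_append]
        have : ¬ b = b' := fun h => hbb h.symm
        simp [this]
    · -- new brand: inserted with [] then overwritten with [position]
      rw [hcont]
      simp only [hb, decide_false, Bool.false_eq_true, if_false, PySem.Dict.getD_insert_self,
        PySem.Dict.insert_insert_self]
      refine Prod.ext ?_ (by simp only [List.length_append, List.length_cons, List.length_nil]; push_cast; ring)
      apply PySem.Dict.ext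
      have hnc : (PySem.Dict.mk ((PySem.Set.ofList l).map (fun b => (b, posList l b)))).contains b
          = false := by rw [hcont]; simp [hb]
      rw [PySem.Dict.items_insert_of_not_contains _ _ hnc]
      have hS : PySem.Set.ofList (l ++ [b])
          = PySem.Set.ofList l ++ [b] := by
        rw [PySem.Set.ofList_append_singleton,
          PySem.Set.add_of_not_mem (fun h => hb ((PySem.Set.mem_ofList l b).1 h))]
      simp only [hS, List.map_append, List.map_cons, List.map_nil]
      congr 1
      · refine List.map_congr_left (fun b' hb' => ?_)
        have hbb : ¬ b = b' := fun h => by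
          subst h; exact hb ((PySem.Set.mem_ofList l b).1 hb')
        rw [posList_append]
        simp [hbb]
      · rw [posList_append, posList_of_not_mem l b hb]
        simp

theorem pv_main (shoes : List String) :
    build_placements shoes = build_placements_alt shoes := by
  rw [build_placements, loop_inv]
  rfl

-- ===== VERDICT (by name: the statement is the Claim_ definition above) =====
theorem build_placements_spec : Claim_equal_build_placements := by
  intro shoes _
  exact pv_main shoes
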